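-- pv_equiv track=rewrite | github.com/robertogarita/Proyecto-3-POO | FINAL SERVER TEMPORAL.py | read_clientes_aux
-- ===== SOURCE A (Python) =====
-- def read_clientes_aux(lista):
--     i=0
--     listaNueva=[]
--     while(i<=len(lista)-1):
--         listaNueva += [lista[i].split(";")]
--         i+=1
--     while(listaNueva[-1]==[""]):
--         listaNueva=listaNueva[:-1]
--     listaNueva=Buscador_inicial_1(listaNueva)
--     return listaNueva
--
-- def inversa(matriz):
--     i=0
--     lista_new=[]
--     i=(len(matriz)-1)
--     while(i!=-1):
--         lista_new+=[matriz[i]]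
--         i-=1
--     return lista_new
--
-- def Buscador_inicial_1(matriz):
--     ma = inversa(matriz)
--     bandera = 0
--     lista=[]
--     i = 0
--     p = 1
--     while(i<len(matriz)):
--         p = i + 1
--         while(p<len(matriz)):
--             if ma[i][0]==ma[p][0]:
--                 bandera=1
--                 p+=1
--             else:
--                 p+=1
--         if bandera==0:
--             lista=[ma[i]]+lista
--         i+=1
--         bandera=0
--     return lista
-- ===== SOURCE B (Python) =====
-- def read_clientes_aux(lista):
--     rows = [s.split(";") for s in lista]
--     while rows and rows[-1] == [""]:
--         rows.pop()
--     seen = set()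
--     out = []
--     for r in rows:
--         if r[0] not in seen:
--             seen.add(r[0])
--             out.append(r)
--     return out
-- ===== Notes on version B (the rewrite author's own statement) =====
-- stated objective: faster
-- what changed: Replaces the reverse-the-matrix plus quadratic nested duplicate scan (and index-driven while loops) with a single forward pass that keeps the first row per first field using a hash set of seen keys.
import Mathlib
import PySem

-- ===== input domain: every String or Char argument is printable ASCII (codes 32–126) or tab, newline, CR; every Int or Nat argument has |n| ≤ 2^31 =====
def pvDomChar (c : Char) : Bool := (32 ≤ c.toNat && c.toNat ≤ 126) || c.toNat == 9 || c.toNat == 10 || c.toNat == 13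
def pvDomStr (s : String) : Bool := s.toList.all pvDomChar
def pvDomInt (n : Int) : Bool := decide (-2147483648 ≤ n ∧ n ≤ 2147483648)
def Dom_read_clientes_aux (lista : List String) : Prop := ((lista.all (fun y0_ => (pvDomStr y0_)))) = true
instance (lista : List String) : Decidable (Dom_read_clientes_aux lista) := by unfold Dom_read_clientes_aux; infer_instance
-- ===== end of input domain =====

-- B replaces A's reverse-plus-quadratic duplicate scan with one forward pass keeping the
-- first row per first field using a set of seen keys (objective: faster).


-- ===== PORT A =====
-- first while loop: i = 0; while i <= len(lista)-1: listaNueva += [lista[i].split(";")]; i += 1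
-- (s.split(";") = (PySem.Str.split? s ";").getD []; the separator is the nonempty literal ";", so split? is always some)
def pvLoop1A (lista : List String) : List (List String) :=
  (PySem.List.pyRange 0 (lista.length : Int) 1).foldl
    (fun acc i => acc ++ [(PySem.Str.split? (PySem.List.pyGetD lista i "") ";").getD []]) []

-- second while loop: while listaNueva[-1] == [""]: listaNueva = listaNueva[:-1]
-- Each iteration removes one element, so the list's length is enough fuel (a totality guard only).
-- xs[-1] on the empty list is Python's IndexError — those inputs are outside Pre_; xs[:-1] = dropLast.
def pvStripAGo : Nat → List (List String) → List (List String)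
  | 0, xs => xs
  | fuel + 1, xs => if xs.getLast? = some [""] then pvStripAGo fuel xs.dropLast else xs

def pvStripA (xs : List (List String)) : List (List String) := pvStripAGo xs.length xs

-- inversa: i = len(matriz)-1; while i != -1: lista_new += [matriz[i]]; i -= 1
-- (i steps down by 1 from len-1 ≥ -1, so 'i != -1' ⟺ '-1 < i' on every reached i, and len iterations = enough fuel)
def pvInversaGo (matriz : List (List String)) : Nat → Int → List (List String) → List (List String)
  | 0, _, acc => acc
  | fuel + 1, i, acc =>
      if -1 < i then pvInversaGo matriz fuel (i - 1) (acc ++ [PySem.List.pyGetD matriz i []]) else acc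

def pvInversa (matriz : List (List String)) : List (List String) :=
  pvInversaGo matriz matriz.length ((matriz.length : Int) - 1) []

-- inner while of Buscador_inicial_1: while p < len(matriz): if ma[i][0] == ma[p][0]: bandera = 1; p += 1
-- (p climbs by 1 towards n = len(matriz), so n.toNat iterations are enough fuel)
def pvInnerGo (ma : List (List String)) (i : Int) : Nat → Int → Int → Nat → Nat
  | 0, _, _, bandera => bandera
  | fuel + 1, p, n, bandera =>
      if p < n then
        if PySem.List.pyGetD (PySem.List.pyGetD ma i []) 0 "" = PySem.List.pyGetD (PySem.List.pyGetD ma p []) 0 "" then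
          pvInnerGo ma i fuel (p + 1) n 1
        else
          pvInnerGo ma i fuel (p + 1) n bandera
      else bandera

-- outer while of Buscador_inicial_1 (i climbs by 1 towards n, so n.toNat iterations are enough fuel)
def pvOuterGo (n : Int) (ma : List (List String)) : Nat → Int → List (List String) → List (List String)
  | 0, _, lista => lista
  | fuel + 1, i, lista =>
      if i < n then
        pvOuterGo n ma fuel (i + 1)
          (if pvInnerGo ma i n.toNat (i + 1) n 0 = 0 then [PySem.List.pyGetD ma i []] ++ lista else lista)
      else lista

def pvBuscador (matriz : List (List String)) : List (List String) :=
  pvOuterGo (matriz.length : Int) (pvInversa matriz) matriz.length 0 []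

def read_clientes_aux (lista : List String) : List (List String) :=
  pvBuscador (pvStripA (pvLoop1A lista))

-- ===== PORT B =====
-- rows = [s.split(";") for s in lista]
-- while rows and rows[-1] == [""]: rows.pop()   (one element removed per iteration: length fuel, a totality guard only)
def pvStripBGo : Nat → List (List String) → List (List String)
  | 0, xs => xs
  | fuel + 1, xs => if xs ≠ [] ∧ xs.getLast? = some [""] then pvStripBGo fuel xs.dropLast else xs

def pvStripB (xs : List (List String)) : List (List String) := pvStripBGo xs.length xs

-- seen = set(); out = []; for r in rows: if r[0] not in seen: seen.add(r[0]); out.append(r)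
def read_clientes_aux_alt (lista : List String) : List (List String) :=
  let rows := pvStripB (lista.map (fun s => (PySem.Str.split? s ";").getD []))
  (rows.foldl
    (fun (st : PySem.Set String × List (List String)) r =>
      let k := PySem.List.pyGetD r 0 ""
      if PySem.Set.contains st.1 k then st else (PySem.Set.add st.1 k, st.2 ++ [r]))
    (PySem.Set.empty, [])).2

-- ===== PRECONDITION & SPEC =====
-- Pre_ excludes exactly the inputs where A raises IndexError: lists whose elements are all ""
-- (including []), on which the trailing-empty-row strip empties the list and then indexes it.
def Pre_read_clientes_aux (lista : List String) : Prop := ∃ s ∈ lista, s ≠ ""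
instance (lista : List String) : Decidable (Pre_read_clientes_aux lista) := by unfold Pre_read_clientes_aux; infer_instance
def pvWitness_read_clientes_aux : List String := (["a;1", "b;2", "a;3"])

def Spec_read_clientes_aux (lista : List String) (out : List (List String)) : Prop := out = read_clientes_aux_alt lista
instance (lista : List String) (out : List (List String)) : Decidable (Spec_read_clientes_aux lista out) := by unfold Spec_read_clientes_aux; infer_instance

-- ===== CLAIM (what is proved, stated in full; the proofs are below) =====
def Claim_equal_read_clientes_aux : Prop := ∀ (lista : List String), Dom_read_clientes_aux lista → Pre_read_clientes_aux lista → Spec_read_clientes_aux lista (read_clientes_aux lista)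

-- ===== LEMMAS AND PROOFS =====

-- the key of a row, as both ports compute it: row[0]
def pvKey (r : List String) : String := PySem.List.pyGetD r 0 ""

-- A's selection, read off the reversed matrix: keep a row iff its key is neither in the
-- ambient seen-list s nor the key of a later row.
def pvKept : List (List String) → List String → List (List String)
  | [], _ => []
  | r :: rest, s =>
      if pvKey r ∈ s ∨ ∃ r' ∈ rest, pvKey r' = pvKey r then pvKept rest s
      else r :: pvKept rest s

-- B's selection: first-occurrence dedup with a seen-list accumulator.
def pvDedup : List (List String) → List String → List (List String)
  | [], _ => []
  | r :: rest, s =>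
      if pvKey r ∈ s then pvDedup rest s
      else r :: pvDedup rest (s ++ [pvKey r])

theorem pvKept_congr (rs : List (List String)) (s s' : List String)
    (h : ∀ x, x ∈ s ↔ x ∈ s') : pvKept rs s = pvKept rs s' := by
  induction rs with
  | nil => rfl
  | cons r rest ih =>
      simp only [pvKept]
      rw [if_congr (by rw [h]) rfl rfl, ih]

theorem pvKept_append_singleton (xs : List (List String)) (r : List String) (s : List String) :
    pvKept (xs ++ [r]) s = pvKept xs (pvKey r :: s) ++ (if pvKey r ∈ s then [] else [r]) := by
  induction xs generalizing s with
  | nil => simp [pvKept]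
  | cons x xs ih =>
      simp only [List.cons_append, pvKept]
      have hc : (pvKey x ∈ s ∨ ∃ r' ∈ xs ++ [r], pvKey r' = pvKey x)
          ↔ (pvKey x ∈ pvKey r :: s ∨ ∃ r' ∈ xs, pvKey r' = pvKey x) := by
        simp only [List.mem_append, List.mem_cons, List.not_mem_nil, or_false]
        constructor
        · rintro (h | ⟨r', (hr' | rfl), he⟩)
          · exact Or.inl (Or.inr h)
          · exact Or.inr ⟨r', hr', he⟩
          · exact Or.inl (Or.inl he.symm)
        · rintro ((h | h) | ⟨r', hr', he⟩)
          · exact Or.inr ⟨r, Or.inr rfl, h.symm⟩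
          · exact Or.inl h
          · exact Or.inr ⟨r', Or.inl hr', he⟩
      rw [if_congr hc rfl rfl, ih]
      split_ifs <;> simp

theorem pvKept_reverse (rs : List (List String)) (s : List String) :
    (pvKept rs.reverse s).reverse = pvDedup rs s := by
  induction rs generalizing s with
  | nil => rfl
  | cons r t ih =>
      rw [List.reverse_cons, pvKept_append_singleton]
      by_cases h : pvKey r ∈ s
      · rw [if_pos h]
        simp only [List.append_nil]
        have hmem : ∀ x, x ∈ (pvKey r :: s) ↔ x ∈ s := by
          intro x
          simp only [List.mem_cons]
          constructor
          · rintro (rfl | hx)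
            · exact h
            · exact hx
          · exact Or.inr
        rw [pvKept_congr t.reverse (pvKey r :: s) s hmem, ih]
        simp [pvDedup, h]
      · rw [if_neg h]
        rw [List.reverse_append, List.reverse_singleton]
        rw [pvKept_congr t.reverse (pvKey r :: s) (s ++ [pvKey r]) (by intro x; simp [or_comm]), ih]
        simp [pvDedup, h]

-- ----- A-side characterisation -----

theorem pvLoop1A_eq (lista : List String) :
    pvLoop1A lista = lista.map (fun s => (PySem.Str.split? s ";").getD []) := by
  unfold pvLoop1A
  rw [PySem.List.foldl_pyRange_zero_pyGetD' lista ""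
        (fun acc x => acc ++ [(PySem.Str.split? x ";").getD []]) []]
  rw [PySem.List.foldl_append_singleton_eq_map]
  simp

theorem pvStripGo_eq (fuel : Nat) (xs : List (List String)) :
    pvStripAGo fuel xs = pvStripBGo fuel xs := by
  induction fuel generalizing xs with
  | zero => rfl
  | succ fuel ih =>
      simp only [pvStripAGo, pvStripBGo]
      by_cases h : xs.getLast? = some [""]
      · have hne : xs ≠ [] := by intro e; rw [e] at h; simp at h
        rw [if_pos h, if_pos ⟨hne, h⟩, ih]
      · rw [if_neg h, if_neg (by intro hc; exact h hc.2)]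

theorem pvStripA_eq_pvStripB (xs : List (List String)) : pvStripA xs = pvStripB xs := by
  unfold pvStripA pvStripB
  exact pvStripGo_eq xs.length xs

theorem pvInversaGo_eq (matriz : List (List String)) (fuel : Nat) (i : Int) (acc : List (List String))
    (hf : (i + 1).toNat ≤ fuel) (h1 : -1 ≤ i) (h2 : i < (matriz.length : Int)) :
    pvInversaGo matriz fuel i acc = acc ++ (matriz.take (i + 1).toNat).reverse := by
  induction fuel generalizing i acc with
  | zero =>
      have : i = -1 := by omega
      subst this
      simp [pvInversaGo]
  | succ fuel ih =>
      simp only [pvInversaGo]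
      by_cases h : -1 < i
      · rw [if_pos h]
        rw [ih (i - 1) _ (by omega) (by omega) (by omega)]
        have hi0 : (0 : Int) ≤ i := by omega
        have hlt : i.toNat < matriz.length := by omega
        have hplus : (i + 1).toNat = i.toNat + 1 := by omega
        have h1t : (i - 1 + 1).toNat = i.toNat := by omega
        have htk : matriz.take (i.toNat + 1) = matriz.take i.toNat ++ [matriz[i.toNat]] := by
          rw [List.take_add_one]
          simp [List.getElem?_eq_getElem hlt]
        rw [h1t, hplus, htk, PySem.List.pyGetD_of_nonneg matriz [] hi0,
            List.getD_eq_getElem matriz [] hlt, List.reverse_append]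
        simp
      · rw [if_neg h]
        have : i = -1 := by omega
        subst this
        simp

theorem pvInversa_eq (matriz : List (List String)) : pvInversa matriz = matriz.reverse := by
  unfold pvInversa
  cases matriz with
  | nil => rfl
  | cons a t =>
      rw [pvInversaGo_eq _ _ _ _ (by omega) (by omega) (by omega)]
      have : ((((a :: t).length : Int) - 1) + 1).toNat = (a :: t).length := by omega
      rw [this]
      simp

theorem pvInnerGo_eq (ma : List (List String)) (i : Int) (fuel : Nat) (p : Int) (b : Nat)
    (hf : ((ma.length : Int) - p).toNat ≤ fuel) (hp : 0 ≤ p) (hb : b = 0 ∨ b = 1) :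
    pvInnerGo ma i fuel p (ma.length : Int) b =
      if b = 1 ∨ ∃ r' ∈ ma.drop p.toNat, pvKey r' = pvKey (PySem.List.pyGetD ma i []) then 1 else b := by
  induction fuel generalizing p b with
  | zero =>
      have hge : ma.drop p.toNat = [] := List.drop_eq_nil_of_le (by omega)
      rw [hge]
      simp only [pvInnerGo, List.not_mem_nil, false_and, exists_false, or_false]
      rcases hb with rfl | rfl
      · simp
      · simp
  | succ fuel ih =>
      simp only [pvInnerGo]
      by_cases h : p < (ma.length : Int)
      · rw [if_pos h]
        have hlt : p.toNat < ma.length := by omega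
        have hdrop : ma.drop p.toNat = ma[p.toNat] :: ma.drop (p.toNat + 1) := by
          rw [List.drop_eq_getElem_cons hlt]
        have hgetp : PySem.List.pyGetD ma p [] = ma[p.toNat] := by
          rw [PySem.List.pyGetD_of_nonneg ma [] hp, List.getD_eq_getElem ma [] hlt]
        by_cases he : PySem.List.pyGetD (PySem.List.pyGetD ma i []) 0 "" = PySem.List.pyGetD (PySem.List.pyGetD ma p []) 0 ""
        · rw [if_pos he]
          rw [ih (p + 1) 1 (by omega) (by omega) (Or.inr rfl)]
          rw [if_pos (Or.inl rfl), if_pos]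
          refine Or.inr ⟨ma[p.toNat], by rw [hdrop]; exact List.mem_cons_self .., ?_⟩
          rw [← hgetp]
          exact he.symm
        · rw [if_neg he]
          rw [ih (p + 1) b (by omega) (by omega) hb]
          have hpt : (p + 1).toNat = p.toNat + 1 := by omega
          rw [hpt]
          have hcond : (b = 1 ∨ ∃ r' ∈ ma.drop (p.toNat + 1), pvKey r' = pvKey (PySem.List.pyGetD ma i []))
              ↔ (b = 1 ∨ ∃ r' ∈ ma.drop p.toNat, pvKey r' = pvKey (PySem.List.pyGetD ma i [])) := by
            rw [hdrop]
            constructor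
            · rintro (h1 | ⟨r', hr', he'⟩)
              · exact Or.inl h1
              · exact Or.inr ⟨r', List.mem_cons_of_mem _ hr', he'⟩
            · rintro (h1 | ⟨r', hr', he'⟩)
              · exact Or.inl h1
              · rcases List.mem_cons.mp hr' with rfl | hm
                · exact absurd (by rw [← hgetp] at he'; exact he'.symm) he
                · exact Or.inr ⟨r', hm, he'⟩
          rw [if_congr hcond rfl rfl]
      · rw [if_neg h]
        have hge : ma.drop p.toNat = [] := List.drop_eq_nil_of_le (by omega)
        rw [hge]
        simp only [List.not_mem_nil, false_and, exists_false, or_false]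
        rcases hb with rfl | rfl
        · simp
        · simp

theorem pvOuterGo_eq (ma : List (List String)) (fuel : Nat) (i : Int) (acc : List (List String))
    (hf : ((ma.length : Int) - i).toNat ≤ fuel) (hi : 0 ≤ i) :
    pvOuterGo (ma.length : Int) ma fuel i acc = (pvKept (ma.drop i.toNat) []).reverse ++ acc := by
  induction fuel generalizing i acc with
  | zero =>
      rw [List.drop_eq_nil_of_le (by omega)]
      rfl
  | succ fuel ih =>
      simp only [pvOuterGo]
      by_cases h : i < (ma.length : Int)
      · rw [if_pos h]
        have hlt : i.toNat < ma.length := by omega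
        have hdrop : ma.drop i.toNat = ma[i.toNat] :: ma.drop (i.toNat + 1) := by
          rw [List.drop_eq_getElem_cons hlt]
        have hgeti : PySem.List.pyGetD ma i [] = ma[i.toNat] := by
          rw [PySem.List.pyGetD_of_nonneg ma [] hi, List.getD_eq_getElem ma [] hlt]
        have hnn : (ma.length : Int).toNat = ma.length := by omega
        rw [hnn, pvInnerGo_eq ma i ma.length (i + 1) 0 (by omega) (by omega) (Or.inl rfl)]
        rw [ih (i + 1) _ (by omega) (by omega)]
        have hit : (i + 1).toNat = i.toNat + 1 := by omega
        rw [hit, hdrop]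
        simp only [pvKept, List.not_mem_nil, false_or]
        by_cases hex : ∃ r' ∈ ma.drop (i.toNat + 1), pvKey r' = pvKey ma[i.toNat]
        · have : ¬ ((if (0 = 1 ∨ ∃ r' ∈ ma.drop (i.toNat + 1), pvKey r' = pvKey (PySem.List.pyGetD ma i [])) then 1 else 0) = 0) := by
            rw [hgeti, if_pos (Or.inr hex)]
            simp
          rw [if_neg this, if_pos hex]
        · have : ((if (0 = 1 ∨ ∃ r' ∈ ma.drop (i.toNat + 1), pvKey r' = pvKey (PySem.List.pyGetD ma i [])) then 1 else 0) = 0) := by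
            rw [hgeti, if_neg ?hng]
            case hng =>
              rintro (h0 | hx)
              · exact absurd h0 (by decide)
              · exact absurd hx hex
          rw [if_pos this, if_neg hex]
          rw [hgeti]
          simp
      · rw [if_neg h]
        rw [List.drop_eq_nil_of_le (by omega)]
        rfl

theorem pvBuscador_eq (matriz : List (List String)) :
    pvBuscador matriz = pvDedup matriz [] := by
  unfold pvBuscador
  rw [pvInversa_eq]
  have hlen : (matriz.length : Int) = (matriz.reverse.length : Int) := by simp
  have hlen2 : matriz.length = matriz.reverse.length := by simp
  rw [hlen, hlen2, pvOuterGo_eq matriz.reverse matriz.reverse.length 0 [] (by omega) le_rfl]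
  simp only [Int.toNat_zero, List.drop_zero, List.append_nil]
  exact pvKept_reverse matriz []

-- ----- B-side characterisation -----

theorem pvFoldB_eq (rs : List (List String)) (s : PySem.Set String) (out : List (List String)) :
    (rs.foldl
      (fun (st : PySem.Set String × List (List String)) r =>
        let k := PySem.List.pyGetD r 0 ""
        if PySem.Set.contains st.1 k then st else (PySem.Set.add st.1 k, st.2 ++ [r]))
      (s, out)).2 = out ++ pvDedup rs s := by
  induction rs generalizing s out with
  | nil => simp [pvDedup]
  | cons r rest ih =>
      simp only [List.foldl_cons]
      by_cases h : pvKey r ∈ s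
      · have hc : PySem.Set.contains s (PySem.List.pyGetD r 0 "") = true := by
          simp [PySem.Set.contains, pvKey] at h ⊢
          exact h
        simp only [hc, if_true, ih, pvDedup, if_pos h]
      · have hc : PySem.Set.contains s (PySem.List.pyGetD r 0 "") = false := by
          simp [PySem.Set.contains, pvKey] at h ⊢
          exact h
        have hadd : PySem.Set.add s (PySem.List.pyGetD r 0 "") = s ++ [pvKey r] := by
          simp only [PySem.Set.add, hc, Bool.false_eq_true, if_false]
          rfl
        simp only [hc, Bool.false_eq_true, if_false, hadd, ih, pvDedup, if_neg h]
        simp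

-- ===== VERDICT (by name: the statement is the Claim_ definition above) =====
theorem read_clientes_aux_spec : Claim_equal_read_clientes_aux := by
  intro lista _ _
  unfold Spec_read_clientes_aux read_clientes_aux read_clientes_aux_alt
  rw [pvLoop1A_eq, pvStripA_eq_pvStripB, pvBuscador_eq]
  rw [pvFoldB_eq (pvStripB (lista.map fun s => (PySem.Str.split? s ";").getD [])) PySem.Set.empty []]
  rfl
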